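-- pv_equiv track=rewrite | github.com/pleelapr/a-sdlc | src/a_sdlc/artifacts/prd.py | detect_change_type
-- ===== SOURCE A (Python) =====
-- def extract_sections(markdown: str) -> dict[str, str]:
--     """Parse markdown into section dictionary.
--
--     Args:
--         markdown: Markdown content with ## sections.
--
--     Returns:
--         Dict mapping section names to content.
--
--     Examples:
--         "## Goals\\nContent\\n## Requirements\\nMore" ->
--         {"Goals": "Content", "Requirements": "More"}
--     """
--     sections = {}
--     current_section = None
--     current_content = []
--
--     for line in markdown.split("\n"):
--         if line.startswith("## "):
--             if current_section:
--                 sections[current_section] = "\n".join(current_content).strip()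
--             current_section = line[3:].strip()
--             current_content = []
--         elif current_section:
--             current_content.append(line)
--
--     if current_section:
--         sections[current_section] = "\n".join(current_content).strip()
--
--     return sections
--
-- def detect_change_type(original: str, updated: str) -> str:
--     """Detect type of change between two markdown documents.
--
--     Args:
--         original: Original markdown content.
--         updated: Updated markdown content.
--
--     Returns:
--         "structural" (sections added/removed),
--         "content" (significant content changes), or
--         "typo" (minor text changes).
--     """
--     original_sections = extract_sections(original)
--     updated_sections = extract_sections(updated)
--
--     # Structural: sections added/removed
--     if set(original_sections.keys()) != set(updated_sections.keys()):
--         return "structural"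
--
--     # Compare content magnitude
--     total_diff = sum(
--         abs(len(original_sections.get(s, "")) - len(updated_sections.get(s, "")))
--         for s in set(original_sections.keys()) | set(updated_sections.keys())
--     )
--
--     if total_diff > 200:  # Significant changes
--         return "content"
--     else:
--         return "typo"
-- ===== SOURCE B (Python) =====
-- def detect_change_type(original: str, updated: str) -> str:
--     def sections(md: str) -> dict:
--         d = {}
--         lines = md.split("\n")
--         # skip any preamble before the first "## " header
--         while lines and not lines[0].startswith("## "):
--             lines = lines[1:]
--         # consume one whole section (header + body) per iteration
--         while lines:
--             name = lines[0][3:].strip()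
--             j = 1
--             while j < len(lines) and not lines[j].startswith("## "):
--                 j += 1
--             if name:
--                 d[name] = "\n".join(lines[1:j]).strip()
--             lines = lines[j:]
--         return d
--
--     a = sections(original)
--     b = sections(updated)
--     if a.keys() != b.keys():
--         return "structural"
--     total = sum(abs(len(a[s]) - len(b[s])) for s in a)
--     return "content" if total > 200 else "typo"
-- ===== Notes on version B (the rewrite author's own statement) =====
-- stated objective: alternative
-- what changed: extract_sections is rewritten as a segment-at-a-time scan (skip the preamble, then repeatedly take a header line plus its body slice up to the next header) instead of A's single-pass line accumulator with pending current_section/current_content state; the comparison logic is kept but sums over one dict's keys once key equality is established.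
import Mathlib
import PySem

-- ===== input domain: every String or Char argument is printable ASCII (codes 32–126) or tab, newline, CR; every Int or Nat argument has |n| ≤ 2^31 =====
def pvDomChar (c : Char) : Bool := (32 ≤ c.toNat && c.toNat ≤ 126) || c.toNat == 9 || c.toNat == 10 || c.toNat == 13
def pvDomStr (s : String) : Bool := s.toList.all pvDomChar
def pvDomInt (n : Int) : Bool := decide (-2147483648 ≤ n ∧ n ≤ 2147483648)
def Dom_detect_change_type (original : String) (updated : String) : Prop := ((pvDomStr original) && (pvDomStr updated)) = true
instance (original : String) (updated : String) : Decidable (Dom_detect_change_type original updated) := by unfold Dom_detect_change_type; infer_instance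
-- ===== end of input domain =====

-- B rewrites extract_sections as a segment-at-a-time scan (skip preamble, then take each
-- header with its body slice) instead of A's line-by-line accumulator; objective: alternative.


-- markdown.split("\n"): the separator is the non-empty literal "\n", so split? is always some
def pvLines (markdown : String) : List String := (PySem.Str.split? markdown "\n").getD []

-- ===== PORT A =====
-- the conditional 'if current_section: sections[current_section] = "\n".join(...).strip()'
-- saves of A ('current_section' is falsy when None or "")
def pvSaveA (d : PySem.Dict String String) (cs : Option String) (cc : List String) :
    PySem.Dict String String :=
  match cs with
  | some s => if s ≠ "" then d.insert s (PySem.Str.strip (PySem.Str.join "\n" cc)) else d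
  | none => d

-- one iteration of A's 'for line in markdown.split("\n")' loop over the state
-- (sections, current_section, current_content)
def pvStepA : PySem.Dict String String × Option String × List String → String →
    PySem.Dict String String × Option String × List String
  | (d, cs, cc), line =>
    if PySem.Str.startswith line "## " then
      (pvSaveA d cs cc, some (PySem.Str.strip (PySem.Str.slice line (some 3) none)), [])
    else
      match cs with
      | some s => if s ≠ "" then (d, some s, cc ++ [line]) else (d, some s, cc)
      | none => (d, none, cc)

def pvExtractA (markdown : String) : PySem.Dict String String :=
  let fin := (pvLines markdown).foldl pvStepA (PySem.Dict.empty, none, [])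
  pvSaveA fin.1 fin.2.1 fin.2.2

def detect_change_type (original : String) (updated : String) : String :=
  let oS := pvExtractA original
  let uS := pvExtractA updated
  if !(PySem.Set.equal (PySem.Set.ofList oS.keys) (PySem.Set.ofList uS.keys)) then "structural"
  else
    -- the sum over a Python set: the Int sum is iteration-order independent
    let total := (PySem.Set.union (PySem.Set.ofList oS.keys) (PySem.Set.ofList uS.keys)).foldl
      (fun acc s => acc + |PySem.Str.len (oS.getD s "") - PySem.Str.len (uS.getD s "")|) 0
    if total > 200 then "content" else "typo"

-- ===== PORT B =====
def pvNotHdr (l : String) : Bool := !(PySem.Str.startswith l "## ")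

-- Source B's inner 'j' scan plus the slices lines[1:j] / lines[j:] are takeWhile / dropWhile
def pvGoB : List String → PySem.Dict String String → PySem.Dict String String
  | [], d => d
  | h :: t, d =>
      let name := PySem.Str.strip (PySem.Str.slice h (some 3) none)
      let body := t.takeWhile pvNotHdr
      pvGoB (t.dropWhile pvNotHdr)
        (if name ≠ "" then d.insert name (PySem.Str.strip (PySem.Str.join "\n" body)) else d)
termination_by l => l.length
decreasing_by exact Nat.lt_succ_of_le (List.length_dropWhile_le _ _)

-- Source B's preamble-skipping while loop is a dropWhile
def pvExtractB (markdown : String) : PySem.Dict String String :=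
  pvGoB ((pvLines markdown).dropWhile pvNotHdr) PySem.Dict.empty

def detect_change_type_alt (original : String) (updated : String) : String :=
  let a := pvExtractB original
  let b := pvExtractB updated
  -- the dict view comparison a.keys() != b.keys() is set comparison (keys are distinct)
  if !(PySem.Set.equal a.keys b.keys) then "structural"
  else
    let total := a.keys.foldl
      (fun acc s => acc + |PySem.Str.len (a.getD s "") - PySem.Str.len (b.getD s "")|) 0
    if total > 200 then "content" else "typo"

-- ===== PRECONDITION & SPEC =====
def Spec_detect_change_type (original : String) (updated : String) (out : String) : Prop := out = detect_change_type_alt original updated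
instance (original : String) (updated : String) (out : String) : Decidable (Spec_detect_change_type original updated out) := by unfold Spec_detect_change_type; infer_instance

-- ===== CLAIM (what is proved, stated in full; the proofs are below) =====
def Claim_equal_detect_change_type : Prop := ∀ (original : String) (updated : String), Dom_detect_change_type original updated → Spec_detect_change_type original updated (detect_change_type original updated)

-- ===== LEMMAS AND PROOFS =====

theorem pvNotHdr_eq_false {l : String} (hl : PySem.Str.startswith l "## " = true) :
    pvNotHdr l = false := by
  simp only [pvNotHdr, hl, Bool.not_true]

theorem pvNotHdr_eq_true {l : String} (hl : ¬ PySem.Str.startswith l "## " = true) :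
    pvNotHdr l = true := by
  simp only [pvNotHdr, Bool.eq_false_iff.mpr hl, Bool.not_false]

-- the conditional save A performs at a header / at the end, with pending content cc ++ body
def pvEmit (d : PySem.Dict String String) (name : String) (cc body : List String) :
    PySem.Dict String String :=
  if name ≠ "" then d.insert name (PySem.Str.strip (PySem.Str.join "\n" (cc ++ body))) else d

theorem pvGoB_cons (h : String) (t : List String) (d : PySem.Dict String String) :
    pvGoB (h :: t) d =
      pvGoB (t.dropWhile pvNotHdr)
        (pvEmit d (PySem.Str.strip (PySem.Str.slice h (some 3) none)) [] (t.takeWhile pvNotHdr)) := by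
  rw [pvGoB, pvEmit]
  simp only [List.nil_append]

-- A's loop from a live section (cs = some name, pending cc) equals B's segment processing
theorem pvSaveA_some (d : PySem.Dict String String) (name : String) (cc : List String) :
    pvSaveA d (some name) cc = pvEmit d name cc [] := by
  rw [pvSaveA, pvEmit, List.append_nil]

theorem pvL2 (lines : List String) : ∀ (d : PySem.Dict String String) (name : String)
    (cc : List String),
    (let fin := lines.foldl pvStepA (d, some name, cc); pvSaveA fin.1 fin.2.1 fin.2.2) =
      pvGoB (lines.dropWhile pvNotHdr) (pvEmit d name cc (lines.takeWhile pvNotHdr)) := by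
  induction lines with
  | nil =>
    intro d name cc
    simp only [List.foldl_nil, List.dropWhile_nil, List.takeWhile_nil, pvGoB]
    exact pvSaveA_some d name cc
  | cons l ls ih =>
    intro d name cc
    by_cases hl : PySem.Str.startswith l "## " = true
    · rw [List.foldl_cons, show pvStepA (d, some name, cc) l =
        (pvSaveA d (some name) cc, some (PySem.Str.strip (PySem.Str.slice l (some 3) none)), [])
        from by rw [pvStepA, if_pos hl]]
      rw [ih, List.dropWhile_cons_of_neg (by rw [pvNotHdr_eq_false hl]; exact Bool.false_ne_true),
        List.takeWhile_cons_of_neg (by rw [pvNotHdr_eq_false hl]; exact Bool.false_ne_true),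
        pvGoB_cons, pvSaveA_some]
    · have hdw : (l :: ls).dropWhile pvNotHdr = ls.dropWhile pvNotHdr :=
        List.dropWhile_cons_of_pos (pvNotHdr_eq_true hl)
      have htw : (l :: ls).takeWhile pvNotHdr = l :: ls.takeWhile pvNotHdr :=
        List.takeWhile_cons_of_pos (pvNotHdr_eq_true hl)
      by_cases hn : name = ""
      · subst hn
        rw [List.foldl_cons, show pvStepA (d, some "", cc) l = (d, some "", cc) from by
          rw [pvStepA, if_neg hl]; exact if_neg (not_not_intro rfl)]
        rw [ih, hdw, htw]
        rw [pvEmit, pvEmit, if_neg (not_not_intro rfl), if_neg (not_not_intro rfl)]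
      · rw [List.foldl_cons, show pvStepA (d, some name, cc) l = (d, some name, cc ++ [l]) from by
          rw [pvStepA, if_neg hl]; exact if_pos hn]
        rw [ih, hdw, htw]
        rw [pvEmit, pvEmit, List.append_assoc]
        rfl

-- A's loop before the first header (cs = None) equals B's skip-then-scan
theorem pvL1 (lines : List String) : ∀ (d : PySem.Dict String String) (cc : List String),
    (let fin := lines.foldl pvStepA (d, none, cc); pvSaveA fin.1 fin.2.1 fin.2.2) =
      pvGoB (lines.dropWhile pvNotHdr) d := by
  induction lines with
  | nil => intro d cc; simp only [List.foldl_nil, List.dropWhile_nil, pvGoB, pvSaveA]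
  | cons l ls ih =>
    intro d cc
    by_cases hl : PySem.Str.startswith l "## " = true
    · rw [List.foldl_cons, show pvStepA (d, none, cc) l =
        (d, some (PySem.Str.strip (PySem.Str.slice l (some 3) none)), [])
        from by rw [pvStepA, if_pos hl]; rfl]
      rw [List.dropWhile_cons_of_neg (by rw [pvNotHdr_eq_false hl]; exact Bool.false_ne_true),
        pvGoB_cons]
      exact pvL2 ls d _ []
    · rw [List.foldl_cons, show pvStepA (d, none, cc) l = (d, none, cc) from by
        rw [pvStepA, if_neg hl]]
      rw [ih d cc, List.dropWhile_cons_of_pos (pvNotHdr_eq_true hl)]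

theorem pvExtract_eq (markdown : String) : pvExtractA markdown = pvExtractB markdown :=
  pvL1 (pvLines markdown) PySem.Dict.empty []

theorem pvGoB_nil (d : PySem.Dict String String) : pvGoB [] d = d := by rw [pvGoB]

theorem pvEmit_nodup_keys (d : PySem.Dict String String) (name : String) (cc body : List String)
    (h : d.keys.Nodup) : (pvEmit d name cc body).keys.Nodup := by
  rw [pvEmit]
  by_cases hn : name = ""
  · rw [if_neg (not_not_intro hn)]; exact h
  · rw [if_pos hn]; exact PySem.Dict.nodup_keys_insert _ _ _ h

theorem pvGoB_nodup_keys_aux (n : Nat) : ∀ (lines : List String), lines.length ≤ n →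
    ∀ d : PySem.Dict String String, d.keys.Nodup → (pvGoB lines d).keys.Nodup := by
  induction n with
  | zero =>
    intro lines hlen d h
    rw [List.length_eq_zero_iff.mp (Nat.le_zero.mp hlen), pvGoB_nil]
    exact h
  | succ n ih =>
    intro lines hlen d h
    match lines with
    | [] => rw [pvGoB_nil]; exact h
    | l :: t =>
      rw [pvGoB_cons]
      exact ih _ (le_trans (List.length_dropWhile_le _ _) (Nat.succ_le_succ_iff.mp hlen)) _
        (pvEmit_nodup_keys _ _ _ _ h)

theorem pvGoB_nodup_keys (lines : List String) (d : PySem.Dict String String)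
    (h : d.keys.Nodup) : (pvGoB lines d).keys.Nodup :=
  pvGoB_nodup_keys_aux lines.length lines le_rfl d h

-- the sum over the union of two equal key sets is the sum over the first key list
theorem pvSum_eq (K K' : List String) (hK : K.Nodup)
    (heq : PySem.Set.equal K K' = true) (g : String → Int) :
    ((PySem.Set.union K K').foldl (fun acc s => acc + g s) 0) =
      K.foldl (fun acc s => acc + g s) 0 := by
  have hmem : ∀ x, x ∈ PySem.Set.union K K' ↔ x ∈ K := by
    intro x
    rw [PySem.Set.mem_union]
    exact ⟨fun h => h.elim id fun h => ((PySem.Set.equal_iff K K').mp heq x).mpr h, Or.inl⟩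
  have hperm : (PySem.Set.union K K').Perm K :=
    (List.perm_ext_iff_of_nodup (PySem.Set.nodup_union K K' hK) hK).mpr hmem
  rw [PySem.List.foldl_add, PySem.List.foldl_add, (hperm.map g).sum_eq]

-- the shared comparison logic, abstracted over the two (key-distinct) section dicts
theorem pvDetect_eq (o u : PySem.Dict String String) (ho : o.keys.Nodup) (hu : u.keys.Nodup) :
    (if !(PySem.Set.equal (PySem.Set.ofList o.keys) (PySem.Set.ofList u.keys)) then "structural"
     else
      if ((PySem.Set.union (PySem.Set.ofList o.keys) (PySem.Set.ofList u.keys)).foldl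
            (fun acc s => acc + |PySem.Str.len (o.getD s "") - PySem.Str.len (u.getD s "")|) 0)
          > 200 then "content" else "typo") =
    (if !(PySem.Set.equal o.keys u.keys) then "structural"
     else
      if (o.keys.foldl
            (fun acc s => acc + |PySem.Str.len (o.getD s "") - PySem.Str.len (u.getD s "")|) 0)
          > 200 then "content" else "typo") := by
  rw [PySem.Set.ofList_eq_self_of_nodup _ ho, PySem.Set.ofList_eq_self_of_nodup _ hu]
  by_cases heq : PySem.Set.equal o.keys u.keys = true
  · rw [pvSum_eq o.keys u.keys ho heq]
  · rw [if_pos (by rw [Bool.eq_false_iff.mpr heq]; rfl),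
      if_pos (by rw [Bool.eq_false_iff.mpr heq]; rfl)]

-- ===== VERDICT (by name: the statement is the Claim_ definition above) =====
theorem detect_change_type_spec : Claim_equal_detect_change_type := by
  intro original updated _
  show detect_change_type original updated = detect_change_type_alt original updated
  unfold detect_change_type detect_change_type_alt
  rw [pvExtract_eq original, pvExtract_eq updated]
  exact pvDetect_eq (pvExtractB original) (pvExtractB updated)
    (pvGoB_nodup_keys _ _ PySem.Dict.nodup_keys_empty)
    (pvGoB_nodup_keys _ _ PySem.Dict.nodup_keys_empty)
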